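-- pv_equiv track=rewrite | github.com/Druidae/Codewars | find_cracker.py | find_hack
-- ===== SOURCE A (Python) =====
-- def find_hack(arr):
--     grade_of_b = ('A', 'B')
--     scores_dict = {
--         "A": 30,
--         "B": 20,
--         "C": 10,
--         "D": 5
--     }
--
--     hack_list = []
--     for i in arr:
--         total_sum = 0
--         count = 0
--         if i[1] > 200:
--             hack_list.append(i[0])
--             continue
--
--         for j in i[2]:
--             asw = scores_dict[j]
--             total_sum += asw
--             if j in grade_of_b:
--                 count += 1
--             else:
--                 count = 0
--         if count >= 5:
--             total_sum += 20
--
--         if total_sum != i[1]: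
--             hack_list.append(i[0])
--
--     return hack_list
-- ===== SOURCE B (Python) =====
-- def find_hack(arr):
--     scores_dict = {"A": 30, "B": 20, "C": 10, "D": 5}
--     hack_list = []
--     for name, claimed, grades in arr:
--         if claimed > 200:
--             hack_list.append(name)
--             continue
--         total = sum(scores_dict[j] for j in grades)
--         run = 0
--         for j in reversed(grades):
--             if j not in ("A", "B"):
--                 break
--             run += 1
--         if run >= 5:
--             total += 20
--         if total != claimed:
--             hack_list.append(name)
--     return hack_list
-- ===== Notes on version B (the rewrite author's own statement) =====
-- stated objective: alternative
-- what changed: Replaces A's single combined pass that maintains sum and a reset-on-failure streak counter together with two differently-shaped passes: a plain sum over the grades, then a reversed scan that counts only the trailing A/B run and breaks at the first other grade.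
import Mathlib
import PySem

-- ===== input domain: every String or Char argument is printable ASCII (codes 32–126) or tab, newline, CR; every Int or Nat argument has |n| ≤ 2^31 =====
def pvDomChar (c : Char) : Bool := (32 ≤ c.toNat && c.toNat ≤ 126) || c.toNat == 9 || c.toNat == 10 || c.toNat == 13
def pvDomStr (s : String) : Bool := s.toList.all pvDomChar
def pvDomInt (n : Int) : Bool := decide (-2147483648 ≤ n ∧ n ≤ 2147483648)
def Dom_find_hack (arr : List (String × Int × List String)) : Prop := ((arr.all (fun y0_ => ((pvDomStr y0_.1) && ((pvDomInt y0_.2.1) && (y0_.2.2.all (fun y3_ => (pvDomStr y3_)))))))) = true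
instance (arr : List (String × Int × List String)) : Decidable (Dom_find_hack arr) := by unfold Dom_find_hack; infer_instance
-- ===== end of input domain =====

-- B changes the decomposition only (same asymptotic cost): one plain sum pass plus a
-- reversed trailing-run scan, instead of A's combined sum+streak pass; return values agree on Pre_.

-- ===== PORT A =====
-- shared literal dict {"A":30,"B":20,"C":10,"D":5}; scores_dict[j] (KeyError) is ported as
-- getD with default 0, exact on Pre_ (which excludes the KeyError inputs).
def pvScores : PySem.Dict String Int :=
  PySem.Dict.ofList [("A", 30), ("B", 20), ("C", 10), ("D", 5)]

-- inner loop of A: state (total_sum, count), count resets to 0 on a non-A/B grade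
def pvInnerA (grades : List String) : Int × Int :=
  grades.foldl
    (fun s j =>
      (s.1 + pvScores.getD j 0, if j = "A" ∨ j = "B" then s.2 + 1 else 0))
    (0, 0)

def find_hack (arr : List (String × Int × List String)) : List String :=
  match arr with
  | [] => []
  | i :: rest =>
    if i.2.1 > 200 then i.1 :: find_hack rest
    else
      let r := pvInnerA i.2.2
      let total := if r.2 ≥ 5 then r.1 + 20 else r.1
      if total ≠ i.2.1 then i.1 :: find_hack rest else find_hack rest

-- ===== PORT B =====
def find_hack_alt (arr : List (String × Int × List String)) : List String :=
  match arr with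
  | [] => []
  | (name, claimed, grades) :: rest =>
    if claimed > 200 then name :: find_hack_alt rest
    else
      let total := (grades.map (fun j => pvScores.getD j 0)).sum
      let run := (grades.reverse.takeWhile (fun j => j == "A" || j == "B")).length
      let total := if run ≥ 5 then total + 20 else total
      if total ≠ claimed then name :: find_hack_alt rest else find_hack_alt rest

-- ===== PRECONDITION & SPEC =====
-- Pre_ excludes exactly the inputs on which A raises KeyError: a record with claimed
-- score ≤ 200 containing a grade other than "A"/"B"/"C"/"D".
def Pre_find_hack (arr : List (String × Int × List String)) : Prop :=
  ∀ r ∈ arr, 200 < r.2.1 ∨ ∀ g ∈ r.2.2, g = "A" ∨ g = "B" ∨ g = "C" ∨ g = "D"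
instance (arr : List (String × Int × List String)) : Decidable (Pre_find_hack arr) := by
  unfold Pre_find_hack; infer_instance
def pvWitness_find_hack : (List (String × Int × List String)) :=
  [("bob", 60, ["A", "B", "C"]), ("eve", 999, ["D"])]
def Spec_find_hack (arr : List (String × Int × List String)) (out : List String) : Prop := out = find_hack_alt arr
instance (arr : List (String × Int × List String)) (out : List String) : Decidable (Spec_find_hack arr out) := by unfold Spec_find_hack; infer_instance

-- ===== CLAIM (what is proved, stated in full; the proofs are below) =====
def Claim_equal_find_hack : Prop := ∀ (arr : List (String × Int × List String)), Dom_find_hack arr → Pre_find_hack arr → Spec_find_hack arr (find_hack arr)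

-- ===== LEMMAS AND PROOFS =====

-- A's combined pass computes (plain sum, trailing A/B run length)
theorem pvInnerA_eq (grades : List String) :
    pvInnerA grades =
      ((grades.map (fun j => pvScores.getD j 0)).sum,
       ((grades.reverse.takeWhile (fun j => j == "A" || j == "B")).length : Int)) := by
  induction grades using List.reverseRecOn with
  | nil => simp [pvInnerA]
  | append_singleton gs g ih =>
      unfold pvInnerA at ih ⊢
      rw [List.foldl_append, ih]
      by_cases h : g = "A" ∨ g = "B"
      · have hb : (g == "A" || g == "B") = true := by
          rcases h with h | h <;> simp [h]
        simp [h, hb]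
      · have hb : (g == "A" || g == "B") = false := by
          simp only [Bool.or_eq_false_iff, beq_eq_false_iff_ne]
          exact ⟨fun hg => h (Or.inl hg), fun hg => h (Or.inr hg)⟩
        simp [h, hb]

theorem find_hack_eq (arr : List (String × Int × List String)) :
    find_hack arr = find_hack_alt arr := by
  induction arr with
  | nil => rfl
  | cons i rest ih =>
      obtain ⟨name, claimed, grades⟩ := i
      show find_hack ((name, claimed, grades) :: rest) = _
      unfold find_hack find_hack_alt
      rw [pvInnerA_eq]
      by_cases h : claimed > 200
      · simp [h, ih]
      · simp only [h, if_false, ih]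
        by_cases h5 :
            (5 : Int) ≤ ((grades.reverse.takeWhile (fun j => j == "A" || j == "B")).length : Int)
        · have h5' : 5 ≤ (grades.reverse.takeWhile (fun j => j == "A" || j == "B")).length := by
            exact_mod_cast h5
          simp [h5, h5']
        · have h5' : ¬ 5 ≤ (grades.reverse.takeWhile (fun j => j == "A" || j == "B")).length := by
            intro hc; exact h5 (by exact_mod_cast hc)
          simp [h5, h5']

-- ===== VERDICT (by name: the statement is the Claim_ definition above) =====
theorem find_hack_spec : Claim_equal_find_hack := by
  intro arr _ _
  exact find_hack_eq arr
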